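-- pv_equiv track=rewrite | github.com/ethanrowe/flowz | flowz/test/channels/iteration_test.py | determine_expected_values
-- ===== SOURCE A (Python) =====
-- def determine_expected_values(values):
--     # 3 channels, one has all vals, others have alternating.
--     vals = []
--     last = None
--     for i, val in enumerate(values):
--         vals.append((
--             (i, val) if i % 2 == 0 else last,
--             (i, val) if i % 2 == 1 else last,
--             (i, val)))
--         last = (i, val)
--     return vals
-- ===== SOURCE B (Python) =====
-- def determine_expected_values(values):
--     # 3 channels, one has all vals, others have alternating.
--     # Closed-form: row i reads the greatest even index <= i and the
--     # greatest odd index <= i directly from the list (None if negative).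
--     vals = list(values)
--     def pair(j):
--         return (j, vals[j]) if j >= 0 else None
--     return [(pair(i - i % 2), pair(i - (i + 1) % 2), (i, v))
--             for i, v in enumerate(vals)]
-- ===== Notes on version B (the rewrite author's own statement) =====
-- stated objective: alternative
-- what changed: Replaces A's sequential pass that threads a `last` accumulator by a closed-form random-access formulation: row i is computed independently by indexing the list at the greatest even index <= i and the greatest odd index <= i (i - i%2 and i - (i+1)%2, None when negative), so no state is carried between iterations.
import Mathlib
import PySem

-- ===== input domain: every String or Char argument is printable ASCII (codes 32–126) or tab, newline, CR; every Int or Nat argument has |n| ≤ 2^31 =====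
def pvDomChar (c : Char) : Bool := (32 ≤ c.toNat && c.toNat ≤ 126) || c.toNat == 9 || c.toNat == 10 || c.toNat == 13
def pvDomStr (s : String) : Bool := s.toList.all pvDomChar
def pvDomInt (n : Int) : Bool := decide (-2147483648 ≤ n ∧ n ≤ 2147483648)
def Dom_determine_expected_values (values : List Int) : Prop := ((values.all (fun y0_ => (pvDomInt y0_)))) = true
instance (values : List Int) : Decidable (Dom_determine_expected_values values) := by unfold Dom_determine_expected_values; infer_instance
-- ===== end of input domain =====

-- B replaces A's sequential loop threading a `last` accumulator by a closed-form
-- random-access formulation: row i is computed independently from indices i - i%2 and i - (i+1)%2.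
-- ===== PORT A =====
def determine_expected_values (values : List Int) : List ((Option (Int × Int)) × (Option (Int × Int)) × (Int × Int)) :=
  -- vals = []; last = None; for i, val in enumerate(values): vals.append(...); last = (i, val)
  ((PySem.List.enumerate values).foldl
    (fun (st : List ((Option (Int × Int)) × (Option (Int × Int)) × (Int × Int)) × Option (Int × Int)) p =>
      (st.1 ++ [((if p.1 % 2 == 0 then some (p.1, p.2) else st.2),
                 (if p.1 % 2 == 1 then some (p.1, p.2) else st.2),
                 (p.1, p.2))],
       some (p.1, p.2)))
    ([], none)).1

-- ===== PORT B =====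
-- pair(j) = (j, vals[j]) if j >= 0 else None
def pvPairAt (vals : List Int) (j : Int) : Option (Int × Int) :=
  if 0 ≤ j then (PySem.List.pyGet? vals j).map (fun v => (j, v)) else none

def determine_expected_values_alt (values : List Int) : List ((Option (Int × Int)) × (Option (Int × Int)) × (Int × Int)) :=
  -- [(pair(i - i % 2), pair(i - (i + 1) % 2), (i, v)) for i, v in enumerate(vals)]
  (PySem.List.enumerate values).map (fun p =>
    (pvPairAt values (p.1 - p.1 % 2), pvPairAt values (p.1 - (p.1 + 1) % 2), p))

-- ===== PRECONDITION & SPEC =====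
def Spec_determine_expected_values (values : List Int) (out : List ((Option (Int × Int)) × (Option (Int × Int)) × (Int × Int))) : Prop := out = determine_expected_values_alt values
instance (values : List Int) (out : List ((Option (Int × Int)) × (Option (Int × Int)) × (Int × Int))) : Decidable (Spec_determine_expected_values values out) := by unfold Spec_determine_expected_values; infer_instance

-- ===== CLAIM (what is proved, stated in full; the proofs are below) =====
def Claim_equal_determine_expected_values : Prop := ∀ (values : List Int), Dom_determine_expected_values values → Spec_determine_expected_values values (determine_expected_values values)

-- ===== LEMMAS AND PROOFS =====

-- The recursion A's loop computes: output for pair list l with previous pair `last`.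
def pvRun (l : List (Int × Int)) (last : Option (Int × Int)) :
    List ((Option (Int × Int)) × (Option (Int × Int)) × (Int × Int)) :=
  match l with
  | [] => []
  | p :: t =>
    ((if p.1 % 2 == 0 then some p else last),
     (if p.1 % 2 == 1 then some p else last), p) :: pvRun t (some p)

theorem pvA_run (l : List (Int × Int)) (acc : List ((Option (Int × Int)) × (Option (Int × Int)) × (Int × Int))) (last : Option (Int × Int)) :
    (l.foldl
      (fun (st : List ((Option (Int × Int)) × (Option (Int × Int)) × (Int × Int)) × Option (Int × Int)) p =>
        (st.1 ++ [((if p.1 % 2 == 0 then some (p.1, p.2) else st.2),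
                   (if p.1 % 2 == 1 then some (p.1, p.2) else st.2),
                   (p.1, p.2))],
         some (p.1, p.2)))
      (acc, last)).1 = acc ++ pvRun l last := by
  induction l generalizing acc last with
  | nil => simp [pvRun]
  | cons p t ih =>
    simp only [List.foldl_cons]
    rw [ih]
    simp [pvRun]

theorem pvRun_length (l : List (Int × Int)) (last : Option (Int × Int)) :
    (pvRun l last).length = l.length := by
  induction l generalizing last with
  | nil => simp [pvRun]
  | cons p t ih => simp [pvRun, ih]

theorem pvRun_getElem (l : List (Int × Int)) (last : Option (Int × Int)) (i : Nat)
    (h : i < l.length) :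
    (pvRun l last)[i]'(by rw [pvRun_length]; exact h) =
      (let p := l.getD i (0, 0)
       let prev := if i = 0 then last else some (l.getD (i - 1) (0, 0))
       ((if p.1 % 2 == 0 then some p else prev),
        (if p.1 % 2 == 1 then some p else prev), p)) := by
  induction l generalizing last i with
  | nil => simp at h
  | cons p t ih =>
    cases i with
    | zero => simp [pvRun]
    | succ j =>
      have hj : j < t.length := by simpa using h
      simp only [pvRun, List.getElem_cons_succ]
      rw [ih (some p) j hj]
      cases j with
      | zero => simp
      | succ k => simp

theorem pvRun_closed (values : List Int) :
    pvRun (PySem.List.enumerate values) none = determine_expected_values_alt values := by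
  apply List.ext_getElem
  · simp [pvRun_length, determine_expected_values_alt]
  · intro i h1 h2
    have hi : i < values.length := by
      simpa [pvRun_length, PySem.List.length_enumerate] using h1
    rw [pvRun_getElem _ _ i (by simpa [PySem.List.length_enumerate] using hi)]
    have henum : ∀ (k : Nat) (hk : k < values.length),
        (PySem.List.enumerate values).getD k (0, 0) = ((k : Int), values[k]'hk) := by
      intro k hk
      rw [List.getD_eq_getElem _ _ (by simpa [PySem.List.length_enumerate] using hk)]
      simp [PySem.List.getElem_enumerate]
    have hB : (determine_expected_values_alt values)[i]'h2 =
        (pvPairAt values ((i : Int) - (i : Int) % 2),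
         pvPairAt values ((i : Int) - ((i : Int) + 1) % 2), ((i : Int), values[i]'hi)) := by
      simp [determine_expected_values_alt, PySem.List.getElem_enumerate]
    rw [hB, henum i hi]
    have hget : ∀ (k : Nat) (hk : k < values.length),
        pvPairAt values (k : Int) = some ((k : Int), values[k]'hk) := by
      intro k hk
      simp [pvPairAt, PySem.List.pyGet?_natCast, List.getElem?_eq_getElem hk]
    by_cases hpar : i % 2 = 0
    · -- even index
      have h2i : ((i : Int)) % 2 = 0 := by omega
      have hB1 : (i : Int) - (i : Int) % 2 = (i : Int) := by omega
      have hB2 : (i : Int) - ((i : Int) + 1) % 2 = (i : Int) - 1 := by omega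
      cases i with
      | zero =>
        have g0 := hget 0 hi
        have gneg : pvPairAt values (-1) = none := by simp [pvPairAt]
        push_cast at g0 ⊢
        norm_num [g0, gneg]
      | succ k =>
        have hk : k < values.length := by omega
        have h0 := hget (k + 1) hi
        have h1' := hget k hk
        have hcast : ((k + 1 : Nat) : Int) - 1 = (k : Int) := by push_cast; omega
        simp only [h2i, hB2, hcast, Nat.succ_sub_one]
        push_cast at h0 ⊢
        simp [h0, h1', List.getElem?_eq_getElem hk]
    · -- odd index
      have h2i : ((i : Int)) % 2 = 1 := by omega
      obtain ⟨k, rfl⟩ : ∃ k, i = k + 1 := ⟨i - 1, by omega⟩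
      have hk : k < values.length := by omega
      have hB2 : ((k + 1 : Nat) : Int) - (((k + 1 : Nat) : Int) + 1) % 2 = ((k + 1 : Nat) : Int) := by
        push_cast at h2i ⊢; omega
      have h0 := hget (k + 1) hi
      have h1' := hget k hk
      simp only [h2i, hB2, Nat.succ_sub_one]
      push_cast at h0 h1' ⊢
      simp [h0, h1', List.getElem?_eq_getElem hk]

-- ===== VERDICT (by name: the statement is the Claim_ definition above) =====
theorem determine_expected_values_spec : Claim_equal_determine_expected_values := by
  intro values _
  show determine_expected_values values = determine_expected_values_alt values
  rw [determine_expected_values, pvA_run, List.nil_append, pvRun_closed]
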